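-- pv_equiv track=rewrite | github.com/s-gerrity/advent-of-code-2020 | day_5_2020.py | check_lst_values
-- ===== SOURCE A (Python) =====
-- def check_lst_values(filled_seats):
--
--     # Make sure the seat ids are in numerical order
--     filled_seats.sort()
--     lst_of_my_seats = []
--
--     for current_id in filled_seats[1:]:
--         # Subtract 2 from the current seat id we're checking
--         value_of_current_seat_id_minus_two = current_id-2
--
--         current_id_index = filled_seats.index(current_id)
--
--         # Get the seat id (the value, not index) of the one that comes before it
--         current_seat_id_minus_one = filled_seats[current_id_index-1]
--
--         # If seat id getting checked is preceeded by a value that is two less,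
--         # for example 53 is two less than 55, than the num in between will be my seat
--         if current_seat_id_minus_one == value_of_current_seat_id_minus_two:
--
--             # Take the value of the current seat id and subtract one from it
--             # because that is an empty seat
--             lst_of_my_seats.append(current_id-1)
--
--     return lst_of_my_seats
-- ===== SOURCE B (Python) =====
-- def check_lst_values(filled_seats):
--     # Sort in place (same observable mutation as the original), then one linear
--     # pass over the sorted tail with O(1) set-membership tests: element x is
--     # preceded by a gap of exactly one free seat iff x-2 is a taken seat and
--     # x-1 is not; that free seat is x-1.
--     filled_seats.sort()
--     seat_ids = set(filled_seats)
--     return [x - 1 for x in filled_seats[1:]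
--             if x - 2 in seat_ids and x - 1 not in seat_ids]
-- ===== Notes on version B (the rewrite author's own statement) =====
-- stated objective: faster
-- what changed: replaces the per-element list.index scan plus positional lookup with a precomputed membership set and one linear pass over the sorted tail
import Mathlib
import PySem

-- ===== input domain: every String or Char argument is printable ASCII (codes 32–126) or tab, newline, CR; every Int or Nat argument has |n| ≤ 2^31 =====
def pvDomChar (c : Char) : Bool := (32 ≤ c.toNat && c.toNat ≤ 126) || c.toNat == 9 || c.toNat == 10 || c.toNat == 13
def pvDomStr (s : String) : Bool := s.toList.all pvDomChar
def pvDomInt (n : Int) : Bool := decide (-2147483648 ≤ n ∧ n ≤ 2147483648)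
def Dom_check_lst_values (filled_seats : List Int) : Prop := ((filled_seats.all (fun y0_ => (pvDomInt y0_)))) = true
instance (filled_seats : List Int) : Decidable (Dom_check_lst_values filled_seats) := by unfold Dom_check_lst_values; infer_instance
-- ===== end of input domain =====

-- B replaces A's per-element list.index scan by a precomputed membership set and one
-- pass over the sorted tail. Both Pythons sort the argument in place; the equivalence
-- proved here is about the RETURN value.

-- ===== PORT A =====
-- the body of A's for-loop: index lookup into the whole sorted list, then the
-- element before that index (Python's s[j-1], possibly negative → pyGet?)
def pvStepA (s : List Int) (acc : List Int) (current_id : Int) : List Int :=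
  let value_of_current_seat_id_minus_two := current_id - 2
  match PySem.List.index? s current_id with
  | none => acc        -- unreachable: current_id ∈ s
  | some j =>
    match PySem.List.pyGet? s ((j : Int) - 1) with
    | none => acc      -- unreachable: s is nonempty here, so j-1 ≥ -1 is in range
    | some current_seat_id_minus_one =>
      if current_seat_id_minus_one == value_of_current_seat_id_minus_two then
        acc ++ [current_id - 1]
      else acc

def check_lst_values (filled_seats : List Int) : List Int :=
  let s := PySem.List.sorted filled_seats (fun x => x) false
  (PySem.List.slice s (some 1) none).foldl (pvStepA s) []

-- ===== PORT B =====
def check_lst_values_alt (filled_seats : List Int) : List Int :=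
  let s := PySem.List.sorted filled_seats (fun x => x) false
  let seat_ids := PySem.Set.ofList s
  ((PySem.List.slice s (some 1) none).filter
      (fun x => PySem.Set.contains seat_ids (x - 2) && !PySem.Set.contains seat_ids (x - 1))).map
    (fun x => x - 1)

-- ===== PRECONDITION & SPEC =====
def Spec_check_lst_values (filled_seats : List Int) (out : List Int) : Prop := out = check_lst_values_alt filled_seats
instance (filled_seats : List Int) (out : List Int) : Decidable (Spec_check_lst_values filled_seats out) := by unfold Spec_check_lst_values; infer_instance

-- ===== CLAIM (what is proved, stated in full; the proofs are below) =====
def Claim_equal_check_lst_values : Prop := ∀ (filled_seats : List Int), Dom_check_lst_values filled_seats → Spec_check_lst_values filled_seats (check_lst_values filled_seats)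

-- ===== LEMMAS AND PROOFS =====

-- On a sorted list s, A's loop body for an element c of s appends c-1 exactly when
-- c-2 is in s and c-1 is not: the element just before the FIRST occurrence of c is
-- the largest element below c (or, at index 0, Python's s[-1] wraparound reads the
-- last element, which is ≥ c and so never equals c-2 — and then nothing < c is in s).
lemma pvStep_eq (s : List Int)
    (hs : ∀ (p q : Nat) (hp : p ≤ q) (hq : q < s.length), s[p]'(lt_of_le_of_lt hp hq) ≤ s[q])
    (acc : List Int) (c : Int) (hc : c ∈ s) :
    pvStepA s acc c =
      if (decide ((c - 2) ∈ s) && !decide ((c - 1) ∈ s)) then acc ++ [c - 1] else acc := by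
  obtain ⟨j, hj⟩ := Option.isSome_iff_exists.mp ((PySem.List.index?_isSome_iff s c).mpr hc)
  obtain ⟨hjlen, hjc, hjfirst⟩ := PySem.List.getElem_of_index?_eq_some hj
  have hlt : ∀ (k : Nat) (hk : k < j), s[k]'(lt_trans hk hjlen) < c := by
    intro k hk
    have h1 := hs k j (le_of_lt hk) hjlen
    have h2 := hjfirst k hk
    rw [hjc] at h1
    omega
  cases j with
  | zero =>
    -- wraparound: prev = last element ≥ s[0] = c > c-2; and nothing in s is < c
    have hne : s ≠ [] := List.ne_nil_of_mem hc
    have hlast : PySem.List.pyGet? s ((0 : Int) - 1) = some (s.getLast hne) := by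
      have h01 : (0 : Int) - 1 = (-1 : Int) := by norm_num
      rw [h01, PySem.List.pyGet?_neg_one, List.getLast?_eq_getLast_of_ne_nil hne]
    have hge : c ≤ s.getLast hne := by
      rw [List.getLast_eq_getElem]
      have := hs 0 (s.length - 1) (by omega) (by omega)
      rw [hjc] at this
      exact this
    have hnm : (c - 2) ∉ s := by
      intro hm
      obtain ⟨m, hmlen, hms⟩ := List.getElem_of_mem hm
      have := hs 0 m (by omega) hmlen
      rw [hjc, hms] at this
      omega
    unfold pvStepA
    simp only [hj, Nat.cast_zero, hlast]
    have h1 : (s.getLast hne == c - 2) = false := by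
      simp only [beq_eq_false_iff_ne, ne_eq]
      omega
    simp [h1, hnm]
  | succ k =>
    have hklen : k < s.length := by omega
    have hprev : PySem.List.pyGet? s ((((k : Nat) + 1 : Nat) : Int) - 1) = some (s[k]) := by
      have : ((((k : Nat) + 1 : Nat) : Int) - 1) = ((k : Nat) : Int) := by push_cast; omega
      rw [this, PySem.List.pyGet?_natCast, List.getElem?_eq_getElem hklen]
    have hkc : s[k] < c := hlt k (by omega)
    unfold pvStepA
    simp only [hj, hprev]
    by_cases h : s[k] = c - 2
    · -- fires: c-2 ∈ s and c-1 ∉ s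
      have hm2 : (c - 2) ∈ s := h ▸ List.getElem_mem hklen
      have hm1 : (c - 1) ∉ s := by
        intro hm
        obtain ⟨m, hmlen, hms⟩ := List.getElem_of_mem hm
        by_cases hmk : m ≤ k
        · have := hs m k hmk hklen
          rw [hms] at this
          omega
        · have := hs (k + 1) m (by omega) hmlen
          rw [hjc, hms] at this
          omega
      simp [h, hm2, hm1]
    · -- does not fire: either c-2 ∉ s, or c-1 ∈ s (namely s[k] itself)
      have hcond : ¬ ((c - 2) ∈ s ∧ (c - 1) ∉ s) := by
        rintro ⟨hm2, hm1⟩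
        obtain ⟨m, hmlen, hms⟩ := List.getElem_of_mem hm2
        have hmk : m ≤ k := by
          by_contra hgt
          have := hs (k + 1) m (by omega) hmlen
          rw [hjc, hms] at this
          omega
        have h1 := hs m k hmk hklen
        rw [hms] at h1
        have h2 : s[k] ≠ c - 1 := fun he => hm1 (he ▸ List.getElem_mem hklen)
        omega
      have h1 : (s[k] == c - 2) = false := by simp [h]
      rw [h1]
      rcases Decidable.not_and_iff_not_or_not.mp hcond with h2 | h2
      · simp [h2]
      · have h3 : (c - 1) ∈ s := Decidable.not_not.mp h2
        simp [h3]

-- ===== VERDICT (by name: the statement is the Claim_ definition above) =====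
theorem check_lst_values_spec : Claim_equal_check_lst_values := by
  intro filled_seats _
  unfold Spec_check_lst_values check_lst_values check_lst_values_alt
  simp only []
  set s := PySem.List.sorted filled_seats (fun x => x) false with hsdef
  have hs : ∀ (p q : Nat) (hp : p ≤ q) (hq : q < s.length),
      s[p]'(lt_of_le_of_lt hp hq) ≤ s[q] := by
    intro p q hp hq
    exact PySem.List.sorted_id_getElem_mono filled_seats hp hq
  rw [PySem.List.slice_from_one]
  have hcong : ∀ x ∈ s.tail, ∀ acc, pvStepA s acc x =
      (fun acc x => if (decide ((x - 2) ∈ s) && !decide ((x - 1) ∈ s)) then acc ++ [x - 1] else acc) acc x := by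
    intro x hx acc
    exact pvStep_eq s hs acc x (List.mem_of_mem_tail hx)
  have hfold := PySem.List.foldl_congr_mem' (l := s.tail) (f := pvStepA s)
    (g := fun acc x => if (decide ((x - 2) ∈ s) && !decide ((x - 1) ∈ s)) then acc ++ [x - 1] else acc)
    (init := ([] : List Int)) hcong
  rw [hfold, PySem.List.foldl_append_if]
  simp only [List.nil_append]
  congr 1
  apply List.filter_congr
  intro x _
  simp [PySem.Set.contains_eq_listContains, PySem.Set.mem_ofList]
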